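-- pv_equiv track=rewrite | github.com/Rruvri/Hub2 | terminal_frames.py | construct_frame
-- ===== SOURCE A (Python) =====
-- STANDARD_WIDTH = 40
--
-- def construct_frame(section):
--     frame = {}
--     line_counter = 2
--     frame[1] = '_'*42
--     border = "|"
--     section = section.split("#")
--     def liner(line, line_counter):
--         formatted_line = str("")
--         leftover = None
--         if line.startswith('=='):
--             header_centre =  " "*((STANDARD_WIDTH - len(line))//2)
--             formatted_line = header_centre + line + header_centre
--
--         else:
--
--             formatted_line = line
--             if len(line) > 38:
--                 formatted_line = line[:39]
--                 leftover = line[39:]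
--
--         frame_line = border + formatted_line
--         if len(frame_line) < 41:
--             difference = 41 - len(frame_line)
--             frame_line += " "*difference
--         frame_line += border
--         line_counter += 1
--
--         frame[line_counter] = frame_line
--
--
--         if leftover != None:
--             leftover = "    " + leftover
--             return liner(leftover, line_counter)
--
--         return (line_counter)
--
--
--
--     for line in section:
--         line_counter = liner(line, line_counter)
--
--     frame[line_counter + 1] = frame[1]
--
--     return frame
-- ===== SOURCE B (Python) =====
-- def construct_frame(section):
--     def render(line):
--         if line.startswith('=='):
--             pad = ' ' * ((40 - len(line)) // 2)
--             return ('|' + pad + line + pad).ljust(41) + '|'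
--         return ('|' + line[:39]).ljust(41) + '|'
--
--     def wrap(line):
--         rows = [render(line)]
--         while not line.startswith('==') and len(line) > 38:
--             line = '    ' + line[39:]
--             rows.append(render(line))
--         return rows
--
--     body = [row for chunk in section.split('#') for row in wrap(chunk)]
--     top = '_' * 42
--     frame = {1: top}
--     for i, row in enumerate(body, start=3):
--         frame[i] = row
--     frame[len(body) + 3] = top
--     return frame
-- ===== Notes on version B (the rewrite author's own statement) =====
-- stated objective: simpler
-- what changed: A mutates a shared dict through a recursive closure that threads a counter; B is a flat pipeline: render each row, wrap long chunks with an iterative while loop, flatten all chunks into one body list, number it with enumerate(start=3) and add the two borders.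
import Mathlib
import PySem

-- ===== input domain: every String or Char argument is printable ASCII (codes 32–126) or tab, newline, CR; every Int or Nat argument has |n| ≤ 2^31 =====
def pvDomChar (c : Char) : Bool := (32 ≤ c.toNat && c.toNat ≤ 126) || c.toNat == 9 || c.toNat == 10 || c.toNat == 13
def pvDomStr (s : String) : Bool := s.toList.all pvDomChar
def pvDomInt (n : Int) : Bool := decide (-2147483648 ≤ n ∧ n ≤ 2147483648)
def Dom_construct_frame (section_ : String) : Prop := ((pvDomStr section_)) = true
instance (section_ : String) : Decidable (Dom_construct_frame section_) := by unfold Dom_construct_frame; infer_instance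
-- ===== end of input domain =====

-- B replaces A's frame-mutating recursive `liner` closure by a flat pipeline: render each
-- wrapped row, flatten all chunks into one body list, and number it with enumerate
-- (objective: simpler decomposition; a timing run measured B faster by a constant factor).

-- ===== PORT A =====
-- the shared tail of A's liner: frame_line = border + formatted, pad to < 41, add border,
-- bump the counter and store
def pvEmitA (formatted : List Char) (cnt : Int) (frame : PySem.Dict Int String) :
    Int × PySem.Dict Int String :=
  let frame_line := '|' :: formatted
  let frame_line :=
    if frame_line.length < 41 then frame_line ++ List.replicate (41 - frame_line.length) ' '
    else frame_line
  let frame_line := frame_line ++ ['|']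
  (cnt + 1, frame.insert (cnt + 1) (String.ofList frame_line))

-- A's recursive liner; the leftover branch recurses with "    " prepended
def pvLinerA (line : List Char) (cnt : Int) (frame : PySem.Dict Int String) :
    Int × PySem.Dict Int String :=
  if PySem.Chars.startswith line ['=', '='] = true then
    let centre := List.replicate (PySem.Int.floordiv (40 - (PySem.Chars.len line : Int)) 2).toNat ' '
    pvEmitA (centre ++ line ++ centre) cnt frame
  else if _h : 38 < line.length then
    let st := pvEmitA (line.take 39) cnt frame
    pvLinerA ([' ', ' ', ' ', ' '] ++ line.drop 39) st.1 st.2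
  else
    pvEmitA line cnt frame
termination_by line.length
decreasing_by simp; omega

def construct_frame (section_ : String) : List (Int × String) :=
  let frame : PySem.Dict Int String :=
    (PySem.Dict.empty).insert 1 (String.ofList (List.replicate 42 '_'))
  let chunks := PySem.Chars.splitOn section_.toList ['#']
  let st := chunks.foldl (fun st line => pvLinerA line st.1 st.2) (2, frame)
  -- frame[line_counter + 1] = frame[1]: key 1 is set at the start and never overwritten,
  -- so the getD default is never used
  (st.2.insert (st.1 + 1) (st.2.getD 1 "")).items

-- ===== PORT B =====
-- Source B's render: one bordered, padded row for a given line
def pvRenderB (line : List Char) : List Char :=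
  if PySem.Chars.startswith line ['=', '='] = true then
    let pad := List.replicate (PySem.Int.floordiv (40 - (PySem.Chars.len line : Int)) 2).toNat ' '
    let cs := '|' :: (pad ++ line ++ pad)
    (cs ++ List.replicate (41 - cs.length) ' ') ++ ['|']   -- .ljust(41) + '|'
  else
    let cs := '|' :: line.take 39
    (cs ++ List.replicate (41 - cs.length) ' ') ++ ['|']

-- Source B's wrap: the while loop as structural recursion on the shrinking line
def pvWrapB (line : List Char) : List (List Char) :=
  pvRenderB line ::
    (if _h : PySem.Chars.startswith line ['=', '='] = false ∧ 38 < line.length then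
       pvWrapB ([' ', ' ', ' ', ' '] ++ line.drop 39)
     else [])
termination_by line.length
decreasing_by simp; omega

def construct_frame_alt (section_ : String) : List (Int × String) :=
  let body := (PySem.Chars.splitOn section_.toList ['#']).flatMap pvWrapB
  let top := String.ofList (List.replicate 42 '_')
  let frame : PySem.Dict Int String := (PySem.Dict.empty).insert 1 top
  let frame := (PySem.List.enumerate body 3).foldl
    (fun f p => f.insert p.1 (String.ofList p.2)) frame
  (frame.insert ((body.length : Int) + 3) top).items

-- ===== PRECONDITION & SPEC =====
def Spec_construct_frame (section_ : String) (out : List (Int × String)) : Prop := out = construct_frame_alt section_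
instance (section_ : String) (out : List (Int × String)) : Decidable (Spec_construct_frame section_ out) := by unfold Spec_construct_frame; infer_instance

-- ===== CLAIM (what is proved, stated in full; the proofs are below) =====
def Claim_equal_construct_frame : Prop := ∀ (section_ : String), Dom_construct_frame section_ → Spec_construct_frame section_ (construct_frame section_)

-- ===== LEMMAS AND PROOFS =====

-- A's conditional padding is B's ljust(41) (Nat subtraction gives the empty pad at ≥ 41)
theorem pvPad_eq (cs : List Char) :
    (if cs.length < 41 then cs ++ List.replicate (41 - cs.length) ' ' else cs)
      = cs ++ List.replicate (41 - cs.length) ' ' := by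
  split_ifs with h
  · rfl
  · have : 41 - cs.length = 0 := by omega
    simp [this]

-- the numbering step B's enumerate-fold performs, written as a fold over rows
def pvStep (st : Int × PySem.Dict Int String) (row : List Char) : Int × PySem.Dict Int String :=
  (st.1 + 1, st.2.insert (st.1 + 1) (String.ofList row))

theorem pvEmit_header (line : List Char) (cnt : Int) (frame : PySem.Dict Int String)
    (hsw : PySem.Chars.startswith line ['=', '='] = true) :
    pvEmitA
      (List.replicate (PySem.Int.floordiv (40 - (PySem.Chars.len line : Int)) 2).toNat ' ' ++ line ++
        List.replicate (PySem.Int.floordiv (40 - (PySem.Chars.len line : Int)) 2).toNat ' ')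
      cnt frame = pvStep (cnt, frame) (pvRenderB line) := by
  simp only [pvEmitA, pvRenderB, pvStep, hsw, if_true]
  rw [pvPad_eq]

theorem pvEmit_trunc (line : List Char) (cnt : Int) (frame : PySem.Dict Int String)
    (hsw : ¬ PySem.Chars.startswith line ['=', '='] = true) :
    pvEmitA (line.take 39) cnt frame = pvStep (cnt, frame) (pvRenderB line) := by
  simp only [pvEmitA, pvRenderB, pvStep, if_neg hsw]
  rw [pvPad_eq]

theorem pvLinerA_eq_wrap (n : Nat) :
    ∀ (line : List Char) (cnt : Int) (frame : PySem.Dict Int String), line.length ≤ n →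
      pvLinerA line cnt frame = (pvWrapB line).foldl pvStep (cnt, frame) := by
  induction n with
  | zero =>
    intro line cnt frame hle
    have hnil : line = [] := List.eq_nil_of_length_eq_zero (by omega)
    subst hnil
    rw [pvLinerA, pvWrapB]
    simp only [List.foldl_cons]
    rw [dif_neg (by simp), if_neg (by decide), dif_neg (by simp)]
    exact pvEmit_trunc [] cnt frame (by decide)
  | succ n ih =>
    intro line cnt frame hle
    rw [pvLinerA, pvWrapB]
    by_cases hsw : PySem.Chars.startswith line ['=', '='] = true
    · rw [if_pos hsw, dif_neg (by simp [hsw])]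
      simpa using pvEmit_header line cnt frame hsw
    · rw [if_neg hsw]
      by_cases hlen : 38 < line.length
      · rw [dif_pos hlen, dif_pos ⟨by simpa using hsw, hlen⟩]
        rw [ih _ _ _ (by simp; omega)]
        simp only [List.foldl_cons]
        rw [pvEmit_trunc line cnt frame hsw]
      · rw [dif_neg hlen, dif_neg (by exact fun hc => hlen hc.2)]
        have htake : line.take 39 = line := List.take_of_length_le (by omega)
        have h := pvEmit_trunc line cnt frame hsw
        rw [htake] at h
        simpa using h

theorem pvFold_chunks (chunks : List (List Char)) :
    ∀ (st : Int × PySem.Dict Int String),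
      chunks.foldl (fun st line => pvLinerA line st.1 st.2) st
        = (chunks.flatMap pvWrapB).foldl pvStep st := by
  induction chunks with
  | nil => intro st; rfl
  | cons c cs ih =>
    intro st
    simp only [List.foldl_cons, List.flatMap_cons, List.foldl_append]
    rw [pvLinerA_eq_wrap c.length c st.1 st.2 le_rfl, ih]

theorem pvFold_enum (rows : List (List Char)) :
    ∀ (c : Int) (f : PySem.Dict Int String),
      rows.foldl pvStep (c, f)
        = (c + rows.length,
           (PySem.List.enumerate rows (c + 1)).foldl
             (fun f p => f.insert p.1 (String.ofList p.2)) f) := by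
  induction rows with
  | nil => intro c f; simp [PySem.List.enumerate]
  | cons r rs ih =>
    intro c f
    rw [List.foldl_cons, PySem.List.enumerate_cons, List.foldl_cons]
    show rs.foldl pvStep (c + 1, f.insert (c + 1) (String.ofList r)) = _
    rw [ih]
    simp only [Prod.mk.injEq, List.length_cons]
    refine ⟨by push_cast; ring, trivial⟩

theorem pvGetD_one (rows : List (List Char)) :
    ∀ (k : Int) (f : PySem.Dict Int String), 1 < k →
      ((PySem.List.enumerate rows k).foldl
          (fun f p => f.insert p.1 (String.ofList p.2)) f).getD 1 ""
        = f.getD 1 "" := by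
  induction rows with
  | nil => intro k f _; rfl
  | cons r rs ih =>
    intro k f hk
    rw [PySem.List.enumerate_cons, List.foldl_cons, ih (k + 1) _ (by omega),
        PySem.Dict.getD_insert_of_ne _ _ _ (by omega)]

-- ===== VERDICT (by name: the statement is the Claim_ definition above) =====
theorem construct_frame_spec : Claim_equal_construct_frame := by
  intro s _hdom
  show construct_frame s = construct_frame_alt s
  simp only [construct_frame, construct_frame_alt]
  rw [pvFold_chunks, pvFold_enum]
  set body := (PySem.Chars.splitOn s.toList ['#']).flatMap pvWrapB with hbody
  have hkey : (2 : Int) + (body.length : Int) + 1 = (body.length : Int) + 3 := by omega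
  rw [show ((2 : Int) + 1) = 3 by norm_num, hkey,
      pvGetD_one body 3 _ (by norm_num), PySem.Dict.getD_insert_self]
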